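-- pv_equiv track=rewrite | github.com/smetj/ketchup | ketchup/__init__.py | remove_leading_dupes
-- ===== SOURCE A (Python) =====
-- def remove_leading_dupes(data, level: int):
--     """
--     Removes repeating values within the same column.
--
--     Args:
--         - data: The table to remove leading dupes from.
--         - level: How many columns deep to remove leading dupes.
--
--     Returns:
--         - The provided dataset without any leading dupes.
--     """
--
--     data.sort(key=lambda t: [t[x] for x in range(level)])
--
--     for index in range(level):
--         lead = None
--         for item in data:
--             if item[index] != lead:
--                 lead = item[index]
--             else:
--                 if index == 0 or item[index - 1] == "":
--                     item[index] = ""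
--     return data
-- ===== SOURCE B (Python) =====
-- def remove_leading_dupes(data, level: int):
--     """
--     Removes repeating values within the same column.
--
--     Single row-major pass after sorting: each row is compared with a snapshot
--     of the previous row's original leading columns, blanking left-to-right.
--     (Like the original, this sorts and blanks `data` in place.)
--     """
--     data.sort(key=lambda t: [t[x] for x in range(level)])
--
--     prev = [None] * level
--     for row in data:
--         snapshot = [row[j] for j in range(level)]
--         for j in range(level):
--             if row[j] == prev[j] and (j == 0 or row[j - 1] == ""):
--                 row[j] = ""
--         prev = snapshot
--     return data
-- ===== Notes on version B (the rewrite author's own statement) =====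
-- stated objective: alternative
-- what changed: A makes level separate column-major passes over the whole table (one pass per leading column, each threading a scalar lead); B makes a single row-major pass that compares each row with a snapshot of the previous row's original leading columns, blanking left to right.
import Mathlib
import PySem

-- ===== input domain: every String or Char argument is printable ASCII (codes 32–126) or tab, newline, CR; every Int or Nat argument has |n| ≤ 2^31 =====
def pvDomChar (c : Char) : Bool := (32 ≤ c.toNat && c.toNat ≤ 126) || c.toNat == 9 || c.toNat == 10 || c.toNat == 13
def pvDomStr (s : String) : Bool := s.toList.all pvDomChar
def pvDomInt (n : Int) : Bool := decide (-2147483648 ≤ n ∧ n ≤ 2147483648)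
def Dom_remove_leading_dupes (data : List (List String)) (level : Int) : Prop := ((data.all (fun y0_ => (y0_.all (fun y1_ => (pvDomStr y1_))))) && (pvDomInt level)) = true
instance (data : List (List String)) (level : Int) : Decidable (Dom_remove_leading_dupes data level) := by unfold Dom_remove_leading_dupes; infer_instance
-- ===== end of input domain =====

-- B replaces A's level-many column-major passes over the whole table by ONE row-major pass
-- that compares each row with a snapshot of the previous row's original leading columns
-- (objective: alternative decomposition of the blanking phase). Both A and B sort and
-- blank `data` in place in Python; the equivalence proved here is about the return value.

-- ===== PORT A =====
-- key=lambda t: [t[x] for x in range(level)]  (shared by both ports: the identical sort line)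
def pvKey (level : Int) (t : List String) : List String :=
  (PySem.List.pyRange 0 level).map (fun x => PySem.List.pyGetD t x "")

-- body of A's inner 'for item in data' loop; state = (lead, rebuilt rows)
def pvAStep (index : Int) (st : Option String × List (List String)) (item : List String) :
    Option String × List (List String) :=
  if some (PySem.List.pyGetD item index "") ≠ st.1 then
    (some (PySem.List.pyGetD item index ""), st.2 ++ [item])
  else if index = 0 ∨ PySem.List.pyGetD item (index - 1) "" = "" then
    (st.1, st.2 ++ [PySem.List.pySetD item index ""])
  else
    (st.1, st.2 ++ [item])

def remove_leading_dupes (data : List (List String)) (level : Int) : List (List String) :=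
  (PySem.List.pyRange 0 level).foldl
    (fun rows index => (rows.foldl (pvAStep index) (none, [])).2)
    (PySem.List.sorted data (pvKey level) false)

-- ===== PORT B =====
-- body of B's inner 'for j in range(level)' loop over one (mutated-in-place) row
def pvBInner (prev : List (Option String)) (r : List String) (j : Int) : List String :=
  if some (PySem.List.pyGetD r j "") = PySem.List.pyGetD prev j none ∧
      (j = 0 ∨ PySem.List.pyGetD r (j - 1) "" = "") then
    PySem.List.pySetD r j ""
  else r

-- body of B's outer 'for row in data' loop; state = (prev snapshot, rebuilt rows)
def pvBStep (level : Int) (st : List (Option String) × List (List String)) (row : List String) :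
    List (Option String) × List (List String) :=
  (((PySem.List.pyRange 0 level).map (fun j => PySem.List.pyGetD row j "")).map some,
    st.2 ++ [(PySem.List.pyRange 0 level).foldl (pvBInner st.1) row])

def remove_leading_dupes_alt (data : List (List String)) (level : Int) : List (List String) :=
  ((PySem.List.sorted data (pvKey level) false).foldl (pvBStep level)
    (PySem.List.pyRepeat [none] level, [])).2

-- ===== PRECONDITION & SPEC =====
-- Pre_ excludes exactly the inputs where Python raises IndexError: a positive level with some
-- row shorter than level (the sort key t[x] is out of range there).
def Pre_remove_leading_dupes (data : List (List String)) (level : Int) : Prop :=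
  level ≤ 0 ∨ ∀ row ∈ data, level ≤ (row.length : Int)
instance (data : List (List String)) (level : Int) : Decidable (Pre_remove_leading_dupes data level) := by
  unfold Pre_remove_leading_dupes; infer_instance

def pvWitness_remove_leading_dupes : List (List String) × Int :=
  ([["a", "x"], ["a", "x"], ["b", "y"]], 2)

def Spec_remove_leading_dupes (data : List (List String)) (level : Int) (out : List (List String)) : Prop :=
  out = remove_leading_dupes_alt data level
instance (data : List (List String)) (level : Int) (out : List (List String)) :
    Decidable (Spec_remove_leading_dupes data level out) := by
  unfold Spec_remove_leading_dupes; infer_instance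

-- ===== CLAIM (what is proved, stated in full; the proofs are below) =====
def Claim_equal_remove_leading_dupes : Prop :=
  ∀ (data : List (List String)) (level : Int), Dom_remove_leading_dupes data level →
    Pre_remove_leading_dupes data level →
    Spec_remove_leading_dupes data level (remove_leading_dupes data level)

-- ===== LEMMAS AND PROOFS =====

-- the previous row's original value at column i (None before the first row)
def pvPcell (p : Option (List String)) (i : Int) : Option String :=
  p.map (fun pr => PySem.List.pyGetD pr i "")

-- one row processed against the previous row's originals, columns 0..i-1 left to right
def pvBlankTo : Nat → Option (List String) → List String → List String
  | 0, _, r => r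
  | i + 1, p, r =>
      if some (PySem.List.pyGetD (pvBlankTo i p r) (i : Int) "") = pvPcell p (i : Int) ∧
          ((i : Int) = 0 ∨ PySem.List.pyGetD (pvBlankTo i p r) ((i : Int) - 1) "" = "") then
        PySem.List.pySetD (pvBlankTo i p r) (i : Int) ""
      else pvBlankTo i p r

-- the whole table with columns 0..i-1 processed, threading the previous original row
def pvPasses (i : Nat) : Option (List String) → List (List String) → List (List String)
  | _, [] => []
  | p, r :: rs => pvBlankTo i p r :: pvPasses i (some r) rs

-- B's prev list: [None]*n before the first row, else the previous row's snapshot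
def pvEnc (n : Nat) : Option (List String) → List (Option String)
  | none => List.replicate n none
  | some pr => ((List.range n).map (fun (k : Nat) => PySem.List.pyGetD pr (k : Int) "")).map some

theorem pvRange_toNat (level : Int) :
    PySem.List.pyRange 0 level = (List.range level.toNat).map (fun (k : Nat) => (k : Int)) := by
  by_cases h : 0 ≤ level
  · have h2 : level = ((level.toNat : Nat) : Int) := (Int.toNat_of_nonneg h).symm
    rw [h2]
    simp only [Int.toNat_natCast]
    exact PySem.List.pyRange_zero_natCast _
  · have h0 : level.toNat = 0 := by omega
    have h3 : ¬ (0 : Int) < level := by omega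
    rw [h0]
    simp [PySem.List.pyRange, h3]

theorem pvBlankTo_preserve (i : Nat) (p : Option (List String)) (r : List String) (j : Nat)
    (h : i ≤ j) : PySem.List.pyGetD (pvBlankTo i p r) (j : Int) "" = PySem.List.pyGetD r (j : Int) "" := by
  induction i with
  | zero => rfl
  | succ i ih =>
    have hij : i ≤ j := by omega
    simp only [pvBlankTo]
    split
    · rw [PySem.List.pySetD_natCast, PySem.List.pyGetD_natCast, List.getD_eq_getElem?_getD,
        List.getElem?_set_ne (by omega : i ≠ j), ← List.getD_eq_getElem?_getD,
        ← PySem.List.pyGetD_natCast]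
      exact ih hij
    · exact ih hij

theorem pvEnc_get (n : Nat) (p : Option (List String)) (j : Nat) (h : j < n) :
    PySem.List.pyGetD (pvEnc n p) (j : Int) none = pvPcell p (j : Int) := by
  cases p with
  | none =>
    simp only [pvEnc, pvPcell, Option.map_none, PySem.List.pyGetD_natCast]
    rw [List.getD_eq_getElem?_getD]
    simp only [List.getElem?_replicate]
    split <;> rfl
  | some pr =>
    simp [pvEnc, pvPcell, PySem.List.pyGetD_natCast, List.getD_eq_getElem?_getD, h]

theorem pvBInner_fold (n : Nat) (p : Option (List String)) (m : Nat) (hm : m ≤ n) (row : List String) :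
    ((List.range m).map (fun (k : Nat) => (k : Int))).foldl (pvBInner (pvEnc n p)) row = pvBlankTo m p row := by
  induction m with
  | zero => rfl
  | succ m ih =>
    rw [List.range_succ, List.map_append, List.foldl_append, ih (by omega)]
    simp only [List.map_cons, List.map_nil, List.foldl_cons, List.foldl_nil]
    simp only [pvBInner, pvBlankTo]
    rw [pvEnc_get n p m (by omega)]

theorem pvB_fold (n : Nat) (rows : List (List String)) (p : Option (List String))
    (acc : List (List String)) :
    (rows.foldl (pvBStep (n : Int)) (pvEnc n p, acc)).2 = acc ++ pvPasses n p rows := by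
  induction rows generalizing p acc with
  | nil => simp [pvPasses]
  | cons r rs ih =>
    have hstep : pvBStep (n : Int) (pvEnc n p, acc) r
        = (pvEnc n (some r), acc ++ [pvBlankTo n p r]) := by
      simp only [pvBStep, PySem.List.pyRange_zero_natCast, List.map_map]
      rw [pvBInner_fold n p n le_rfl r]
      simp [pvEnc, Function.comp]
    rw [List.foldl_cons, hstep, ih (some r) (acc ++ [pvBlankTo n p r])]
    simp [pvPasses]

theorem pvPasses_zero (p : Option (List String)) (rows : List (List String)) :
    pvPasses 0 p rows = rows := by
  induction rows generalizing p with
  | nil => rfl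
  | cons r rs ih => simp [pvPasses, pvBlankTo, ih]

theorem pvA_col (i : Nat) (orig : List (List String)) (p : Option (List String))
    (acc : List (List String)) :
    ((pvPasses i p orig).foldl (pvAStep (i : Int)) (pvPcell p (i : Int), acc)).2 =
      acc ++ pvPasses (i + 1) p orig := by
  induction orig generalizing p acc with
  | nil => simp [pvPasses]
  | cons r rs ih =>
    have hval : PySem.List.pyGetD (pvBlankTo i p r) (i : Int) "" = PySem.List.pyGetD r (i : Int) "" :=
      pvBlankTo_preserve i p r i le_rfl
    have hp : pvPcell (some r) (i : Int) = some (PySem.List.pyGetD (pvBlankTo i p r) (i : Int) "") := by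
      simp [pvPcell, hval]
    simp only [pvPasses, List.foldl_cons]
    have hstep : pvAStep (i : Int) (pvPcell p (i : Int), acc) (pvBlankTo i p r)
        = (pvPcell (some r) (i : Int), acc ++ [pvBlankTo (i + 1) p r]) := by
      simp only [pvAStep, pvBlankTo]
      by_cases h1 : some (PySem.List.pyGetD (pvBlankTo i p r) (i : Int) "") = pvPcell p (i : Int)
      · rw [if_neg (not_not_intro h1)]
        by_cases h2 : (i : Int) = 0 ∨ PySem.List.pyGetD (pvBlankTo i p r) ((i : Int) - 1) "" = ""
        · rw [if_pos h2, if_pos ⟨h1, h2⟩, hp, ← h1]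
        · rw [if_neg h2, if_neg (fun hc => h2 hc.2), hp, ← h1]
      · rw [if_pos h1, if_neg (fun hc => h1 hc.1), hp]
    rw [hstep, ih (some r) (acc ++ [pvBlankTo (i + 1) p r])]
    simp

theorem pvA_outer (i : Nat) (rows : List (List String)) :
    ((List.range i).map (fun (k : Nat) => (k : Int))).foldl
        (fun rows index => (rows.foldl (pvAStep index) (none, [])).2) rows =
      pvPasses i none rows := by
  induction i with
  | zero => simp [pvPasses_zero]
  | succ i ih =>
    rw [List.range_succ, List.map_append, List.foldl_append, ih]
    simp only [List.map_cons, List.map_nil, List.foldl_cons, List.foldl_nil]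
    have hcol := pvA_col i rows none []
    simpa [pvPcell] using hcol

theorem pv_main (data : List (List String)) (level : Int) :
    remove_leading_dupes data level = remove_leading_dupes_alt data level := by
  have hrange : PySem.List.pyRange 0 level = PySem.List.pyRange 0 ((level.toNat : Nat) : Int) := by
    rw [pvRange_toNat, PySem.List.pyRange_zero_natCast]
  have hstep : pvBStep level = pvBStep ((level.toNat : Nat) : Int) := by
    funext st row
    simp only [pvBStep, hrange]
  simp only [remove_leading_dupes, remove_leading_dupes_alt, hrange, hstep,
    PySem.List.pyRepeat_singleton, PySem.List.pyRange_zero_natCast]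
  rw [pvA_outer]
  have hb := pvB_fold level.toNat (PySem.List.sorted data (pvKey level) false) none []
  simp only [pvEnc] at hb
  rw [hb]
  simp

-- ===== VERDICT (by name: the statement is the Claim_ definition above) =====
theorem remove_leading_dupes_spec : Claim_equal_remove_leading_dupes := by
  intro data level _ _
  unfold Spec_remove_leading_dupes
  exact pv_main data level
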